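-- pv_equiv track=rewrite | github.com/Uzma1602/streak_module | mindapp/serializers.py | process_ss_after_false
-- ===== SOURCE A (Python) =====
-- def process_ss_after_false(date_dict):
--     processed_dict = date_dict.copy()
--     encountered_false = False
--     ss_encountered = False
--
--     for day, status in reversed(date_dict.items()):
--         if status == "False":
--             encountered_false = True
--         elif status == "SS" and encountered_false:
--             processed_dict[day] = "BlackSS"
--             ss_encountered = True
--         elif status == "True" and encountered_false and ss_encountered:
--             processed_dict[day] = "BlackTrue"
--
--     return processed_dict
-- ===== SOURCE B (Python) =====
-- def process_ss_after_false(date_dict):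
--     items = list(date_dict.items())
--     result = dict(date_dict)
--     f = -1
--     for i, (day, status) in enumerate(items):
--         if status == "False":
--             f = i
--     if f == -1:
--         return result
--     s = -1
--     for i, (day, status) in enumerate(items[:f]):
--         if status == "SS":
--             result[day] = "BlackSS"
--             s = i
--     if s == -1:
--         return result
--     for day, status in items[:s]:
--         if status == "True":
--             result[day] = "BlackTrue"
--     return result
-- ===== Notes on version B (the rewrite author's own statement) =====
-- stated objective: alternative
-- what changed: A's single reverse scan carrying two boolean flags (encountered_false, ss_encountered) is replaced by index-finding plus forward passes: find the index f of the last 'False' (return a copy if none), relabel every 'SS' before f to 'BlackSS' while recording the last such index s, then relabel every 'True' before s to 'BlackTrue'.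
import Mathlib
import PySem

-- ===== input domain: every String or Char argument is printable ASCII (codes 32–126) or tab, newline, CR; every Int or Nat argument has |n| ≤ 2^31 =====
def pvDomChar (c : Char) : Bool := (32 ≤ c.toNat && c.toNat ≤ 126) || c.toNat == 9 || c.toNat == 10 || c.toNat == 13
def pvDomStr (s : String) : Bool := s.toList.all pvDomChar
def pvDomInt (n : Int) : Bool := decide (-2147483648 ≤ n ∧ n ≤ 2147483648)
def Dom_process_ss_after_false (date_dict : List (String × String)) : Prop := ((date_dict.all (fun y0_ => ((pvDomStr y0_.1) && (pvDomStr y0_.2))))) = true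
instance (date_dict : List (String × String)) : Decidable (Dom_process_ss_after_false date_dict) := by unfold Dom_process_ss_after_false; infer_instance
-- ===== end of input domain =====

-- B replaces A's single reverse scan with two flag accumulators by index-finding (last 'False',
-- then last 'SS' before it) followed by forward relabelling passes; objective: alternative
-- decomposition, same O(n) cost.

-- ===== PORT A =====
def process_ss_after_false (date_dict : List (String × String)) : List (String × String) :=
  let date_d : PySem.Dict String String := PySem.Dict.mk date_dict
  let processed := date_d
  let res := date_d.items.reverse.foldl
    (fun (st : PySem.Dict String String × Bool × Bool) ds =>
      if ds.2 == "False" then (st.1, true, st.2.2)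
      else if ds.2 == "SS" && st.2.1 then (st.1.insert ds.1 "BlackSS", st.2.1, true)
      else if ds.2 == "True" && st.2.1 && st.2.2 then (st.1.insert ds.1 "BlackTrue", st.2.1, st.2.2)
      else st)
    (processed, false, false)
  res.1.items

-- ===== PORT B =====
def process_ss_after_false_alt (date_dict : List (String × String)) : List (String × String) :=
  let date_d : PySem.Dict String String := PySem.Dict.mk date_dict
  let items := date_d.items
  let result := date_d
  let f : Int := (PySem.List.enumerate items).foldl
    (fun f p => if p.2.2 == "False" then p.1 else f) (-1)
  if f == -1 then result.items else
  let st2 := (PySem.List.enumerate (PySem.List.slice items none (some f))).foldl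
    (fun (st : PySem.Dict String String × Int) p =>
      if p.2.2 == "SS" then (st.1.insert p.2.1 "BlackSS", p.1) else st)
    (result, -1)
  let result2 := st2.1
  let s := st2.2
  if s == -1 then result2.items else
  ((PySem.List.slice items none (some s)).foldl
    (fun (d : PySem.Dict String String) kv => if kv.2 == "True" then d.insert kv.1 "BlackTrue" else d)
    result2).items

-- ===== PRECONDITION & SPEC =====
-- Pre_ excludes association lists with duplicate keys: the Python argument is a dict, whose keys
-- are unique by construction, so a duplicate-key list represents no dict input of A.
def Pre_process_ss_after_false (date_dict : List (String × String)) : Prop :=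
  (date_dict.map Prod.fst).Nodup
instance (date_dict : List (String × String)) : Decidable (Pre_process_ss_after_false date_dict) := by
  unfold Pre_process_ss_after_false; infer_instance

def pvWitness_process_ss_after_false : (List (String × String)) :=
  [("a", "True"), ("b", "SS"), ("c", "False")]

def Spec_process_ss_after_false (date_dict : List (String × String)) (out : List (String × String)) : Prop := out = process_ss_after_false_alt date_dict
instance (date_dict : List (String × String)) (out : List (String × String)) : Decidable (Spec_process_ss_after_false date_dict out) := by unfold Spec_process_ss_after_false; infer_instance

-- ===== CLAIM (what is proved, stated in full; the proofs are below) =====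
def Claim_equal_process_ss_after_false : Prop := ∀ (date_dict : List (String × String)), Dom_process_ss_after_false date_dict → Pre_process_ss_after_false date_dict → Spec_process_ss_after_false date_dict (process_ss_after_false date_dict)

-- ===== LEMMAS AND PROOFS =====
def efb (l : List (String × String)) : Bool := l.any (fun p => p.2 == "False")
def ssb : List (String × String) → Bool
  | [] => false
  | p :: xs => (p.2 == "SS" && efb xs) || ssb xs
def uA : List (String × String) → String → Option String
  | [], _ => none
  | p :: xs, k =>
    if p.1 == k then
      (if p.2 == "False" then none
       else if p.2 == "SS" && efb xs then some "BlackSS"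
       else if p.2 == "True" && efb xs && ssb xs then some "BlackTrue"
       else none)
    else uA xs k
def fA (xs : List (String × String)) (q : String × String) : String × String :=
  match uA xs q.1 with
  | some v => (q.1, v)
  | none => q
def u2 (c v : String) : List (String × String) → String → Option String
  | [], _ => none
  | p :: ys, k => if p.1 == k then (if p.2 == c then some v else none) else u2 c v ys k
def f2 (c v : String) (ys : List (String × String)) (q : String × String) : String × String :=
  match u2 c v ys q.1 with
  | some w => (q.1, w)
  | none => q
def lastIdx {α : Type} (pred : α → Bool) : List α → Option Nat
  | [] => none
  | x :: xs =>
    match lastIdx pred xs with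
    | some j => some (j + 1)
    | none => if pred x then some 0 else none

theorem fst_fA (xs : List (String × String)) (q : String × String) : (fA xs q).1 = q.1 := by
  cases h : uA xs q.1 <;> simp [fA, h]

theorem fst_f2 (c v : String) (ys : List (String × String)) (q : String × String) :
    (f2 c v ys q).1 = q.1 := by
  cases h : u2 c v ys q.1 <;> simp [f2, h]

theorem uA_eq_none_of_not_mem (xs : List (String × String)) (k : String)
    (h : k ∉ xs.map Prod.fst) : uA xs k = none := by
  induction xs with
  | nil => rfl
  | cons p xs ih =>
    simp only [List.map_cons, List.mem_cons, not_or] at h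
    have hb : (p.1 == k) = false := by simp; exact fun e => h.1 e.symm
    simp [uA, hb, ih h.2]

theorem u2_eq_none_of_not_mem (c v : String) (ys : List (String × String)) (k : String)
    (h : k ∉ ys.map Prod.fst) : u2 c v ys k = none := by
  induction ys with
  | nil => rfl
  | cons p ys ih =>
    simp only [List.map_cons, List.mem_cons, not_or] at h
    have hb : (p.1 == k) = false := by simp; exact fun e => h.1 e.symm
    simp [u2, hb, ih h.2]

theorem uA_split (l₁ l₂ : List (String × String)) (q : String × String)
    (h : q.1 ∉ l₁.map Prod.fst) :
    uA (l₁ ++ q :: l₂) q.1 =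
      (if q.2 == "False" then none
       else if q.2 == "SS" && efb l₂ then some "BlackSS"
       else if q.2 == "True" && efb l₂ && ssb l₂ then some "BlackTrue"
       else none) := by
  induction l₁ with
  | nil => simp [uA]
  | cons p l₁ ih =>
    simp only [List.map_cons, List.mem_cons, not_or] at h
    have hb : (p.1 == q.1) = false := by simp; exact fun e => h.1 e.symm
    simpa [uA, hb] using ih h.2

theorem u2_split (c v : String) (l₁ l₂ : List (String × String)) (q : String × String)
    (h : q.1 ∉ l₁.map Prod.fst) :
    u2 c v (l₁ ++ q :: l₂) q.1 = (if q.2 == c then some v else none) := by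
  induction l₁ with
  | nil => simp [u2]
  | cons p l₁ ih =>
    simp only [List.map_cons, List.mem_cons, not_or] at h
    have hb : (p.1 == q.1) = false := by simp; exact fun e => h.1 e.symm
    simpa [u2, hb] using ih h.2

theorem lastIdx_append {α : Type} (pred : α → Bool) (l₁ l₂ : List α) :
    lastIdx pred (l₁ ++ l₂) =
      match lastIdx pred l₂ with
      | some j => some (l₁.length + j)
      | none => lastIdx pred l₁ := by
  induction l₁ with
  | nil => cases h : lastIdx pred l₂ <;> simp [h, lastIdx]
  | cons x l₁ ih =>
    show lastIdx pred (x :: (l₁ ++ l₂)) = _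
    rw [lastIdx, ih]
    cases h : lastIdx pred l₂ with
    | none => simp [lastIdx]
    | some j =>
      simp only []
      cases h1 : lastIdx pred l₁ <;> simp [List.length_cons] <;> omega

theorem lastIdx_lt_length {α : Type} (pred : α → Bool) (l : List α) (j : Nat)
    (h : lastIdx pred l = some j) : j < l.length := by
  induction l generalizing j with
  | nil => simp [lastIdx] at h
  | cons x l ih =>
    rw [lastIdx] at h
    cases h1 : lastIdx pred l with
    | some m => rw [h1] at h; simp at h; have := ih m h1; simp; omega
    | none =>
      rw [h1] at h
      by_cases hp : pred x = true
      · simp [hp] at h; simp; omega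
      · simp [hp] at h

theorem lastIdx_eq_none_iff {α : Type} (pred : α → Bool) (l : List α) :
    lastIdx pred l = none ↔ l.any pred = false := by
  induction l with
  | nil => simp [lastIdx]
  | cons x l ih =>
    rw [lastIdx]
    cases h1 : lastIdx pred l with
    | some m => simp [h1] at ih ⊢; simp [ih]
    | none =>
      rw [h1] at ih
      by_cases hp : pred x = true <;> simp [hp, ih.mp rfl]

theorem ssb_eq_false_of_efb_false (l : List (String × String)) (h : efb l = false) :
    ssb l = false := by
  induction l with
  | nil => rfl
  | cons p l ih =>
    simp only [efb, List.any_cons, Bool.or_eq_false_iff] at h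
    have he : efb l = false := h.2
    rw [ssb]
    simp [he, ih he]

theorem ssb_eq_any_take (l : List (String × String)) (j : Nat)
    (h : lastIdx (fun p => p.2 == "False") l = some j) :
    ssb l = (l.take j).any (fun p => p.2 == "SS") := by
  induction l generalizing j with
  | nil => simp [lastIdx] at h
  | cons p l ih =>
    rw [lastIdx] at h
    cases h1 : lastIdx (fun p => p.2 == "False") l with
    | some m =>
      rw [h1] at h
      simp only [Option.some.injEq] at h
      subst h
      have hef : efb l = true := by
        rcases hany : efb l with _ | _
        · rw [(lastIdx_eq_none_iff _ _).mpr hany] at h1; cases h1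
        · rfl
      rw [ssb, ih m h1]
      simp [hef]
    | none =>
      rw [h1] at h
      have hef : efb l = false := (lastIdx_eq_none_iff _ _).mp h1
      by_cases hp : (p.2 == "False") = true
      · simp only [hp, if_true, Option.some.injEq] at h
        subst h
        rw [ssb]
        simp [hef, ssb_eq_false_of_efb_false l hef]
      · simp [hp] at h

theorem foldl_enumerate_snd {α σ : Type} (F : σ → α → σ) (l : List α) (s0 : Int) (a : σ) :
    (PySem.List.enumerate l s0).foldl (fun acc p => F acc p.2) a = l.foldl F a := by
  induction l generalizing s0 a with
  | nil => rfl
  | cons x l ih => rw [PySem.List.enumerate_cons]; simp only [List.foldl_cons]; exact ih _ _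

theorem foldl_enumerate_lastIdx {α : Type} (pred : α → Bool) (l : List α) (s0 a : Int) :
    (PySem.List.enumerate l s0).foldl (fun acc p => if pred p.2 then p.1 else acc) a
      = match lastIdx pred l with
        | some j => s0 + j
        | none => a := by
  induction l generalizing s0 a with
  | nil => rfl
  | cons x l ih =>
    rw [PySem.List.enumerate_cons]
    simp only [List.foldl_cons]
    rw [ih]
    rw [lastIdx]
    cases h1 : lastIdx pred l with
    | some j => simp only []; push_cast; ring
    | none => by_cases hp : pred x = true <;> simp [hp]

theorem A_char (xs : List (String × String)) (d : PySem.Dict String String)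
    (hnd : (xs.map Prod.fst).Nodup) (hsub : ∀ p ∈ xs, p.1 ∈ d.keys) :
    xs.foldr
      (fun ds (st : PySem.Dict String String × Bool × Bool) =>
        if ds.2 == "False" then (st.1, true, st.2.2)
        else if ds.2 == "SS" && st.2.1 then (st.1.insert ds.1 "BlackSS", st.2.1, true)
        else if ds.2 == "True" && st.2.1 && st.2.2 then (st.1.insert ds.1 "BlackTrue", st.2.1, st.2.2)
        else st)
      (d, false, false)
    = (PySem.Dict.mk (d.items.map (fA xs)), efb xs, ssb xs) := by
  induction xs with
  | nil =>
    have h1 : d.items.map (fA []) = d.items := by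
      rw [List.map_congr_left (fun q (_ : q ∈ d.items) => (rfl : fA [] q = id q))]
      exact List.map_id _
    rw [List.foldr_nil, h1]
    rfl
  | cons p xs ih =>
    have hp1 : p.1 ∉ xs.map Prod.fst := by
      simp only [List.map_cons, List.nodup_cons] at hnd
      exact hnd.1
    have hnd' : (xs.map Prod.fst).Nodup := by
      simp only [List.map_cons, List.nodup_cons] at hnd
      exact hnd.2
    have hsub' : ∀ r ∈ xs, r.1 ∈ d.keys := fun r hr => hsub r (List.mem_cons_of_mem _ hr)
    rw [List.foldr_cons, ih hnd' hsub']
    have hcont : (PySem.Dict.mk (d.items.map (fA xs))).contains p.1 = true := by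
      rw [PySem.Dict.contains_iff_mem_keys]
      have hk : (PySem.Dict.mk (d.items.map (fA xs))).keys = d.keys := by
        show (d.items.map (fA xs)).map Prod.fst = d.items.map Prod.fst
        rw [List.map_map]
        exact List.map_congr_left (fun q _ => fst_fA xs q)
      rw [hk]
      exact hsub p (List.mem_cons_self)
    have hbne : ∀ q : String × String, ¬ (p.1 == q.1) = true → (q.1 == p.1) = false := by
      intro q hq
      rcases hb : (q.1 == p.1) with _ | _
      · rfl
      · exact absurd (by simp [eq_of_beq hb] : (p.1 == q.1) = true) hq
    dsimp only
    by_cases hF : (p.2 == "False") = true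
    · have he : efb (p :: xs) = true := by simp [efb, hF]
      have hs : ssb (p :: xs) = ssb xs := by
        rw [ssb]
        have : (p.2 == "SS") = false := by have := eq_of_beq hF; simp [this]
        simp [this]
      have hfun : d.items.map (fA (p :: xs)) = d.items.map (fA xs) := by
        apply List.map_congr_left
        intro q _
        by_cases hq : (p.1 == q.1) = true
        · have hqe : q.1 = p.1 := (eq_of_beq hq).symm
          simp only [fA, uA, hq, hF, if_true]
          rw [hqe, uA_eq_none_of_not_mem xs p.1 hp1]
        · simp [fA, uA, hq]
      rw [if_pos hF, he, hs, hfun]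
    · have he : efb (p :: xs) = efb xs := by simp [efb, hF]
      rw [if_neg hF]
      by_cases hSS : (p.2 == "SS" && efb xs) = true
      · have hs : ssb (p :: xs) = true := by rw [ssb]; simp [hSS]
        have hfun : (d.items.map (fA xs)).map
              (fun r => if (r.1 == p.1) = true then (p.1, "BlackSS") else r)
            = d.items.map (fA (p :: xs)) := by
          rw [List.map_map]
          apply List.map_congr_left
          intro q _
          show (if ((fA xs q).1 == p.1) = true then (p.1, "BlackSS") else fA xs q) = fA (p :: xs) q
          rw [fst_fA]
          by_cases hq : (p.1 == q.1) = true
          · have hqe : q.1 = p.1 := (eq_of_beq hq).symm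
            have hq2 : (q.1 == p.1) = true := by simp [hqe]
            have hSS' := hSS
            rw [Bool.and_eq_true] at hSS'
            rcases hSS' with ⟨hss1, hss2⟩
            simp [fA, uA, hq, hq2, if_neg hF, hss2, eq_of_beq hss1, hqe]
          · rw [hbne q hq]
            simp [fA, uA, hq]
        have hins : ((PySem.Dict.mk (d.items.map (fA xs))).insert p.1 "BlackSS")
            = PySem.Dict.mk (d.items.map (fA (p :: xs))) := by
          apply PySem.Dict.ext
          rw [PySem.Dict.items_insert_of_contains _ _ hcont]
          exact hfun
        rw [if_pos hSS, he, hs, hins]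
      · rw [if_neg hSS]
        have h0 : (p.2 == "SS" && efb xs) = false := by
          rcases hb : (p.2 == "SS" && efb xs) with _ | _
          · rfl
          · exact absurd hb hSS
        have hs : ssb (p :: xs) = ssb xs := by rw [ssb]; simp [h0]
        by_cases hT : (p.2 == "True" && efb xs && ssb xs) = true
        · have hfun : (d.items.map (fA xs)).map
                (fun r => if (r.1 == p.1) = true then (p.1, "BlackTrue") else r)
              = d.items.map (fA (p :: xs)) := by
            rw [List.map_map]
            apply List.map_congr_left
            intro q _
            show (if ((fA xs q).1 == p.1) = true then (p.1, "BlackTrue") else fA xs q) = fA (p :: xs) q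
            rw [fst_fA]
            by_cases hq : (p.1 == q.1) = true
            · have hqe : q.1 = p.1 := (eq_of_beq hq).symm
              have hq2 : (q.1 == p.1) = true := by simp [hqe]
              have hT0 := hT
              rw [Bool.and_eq_true, Bool.and_eq_true] at hT0
              rcases hT0 with ⟨⟨ht1, ht2⟩, ht3⟩
              simp [fA, uA, hq, hq2, eq_of_beq ht1, ht2, ht3, hqe]
            · rw [hbne q hq]
              simp [fA, uA, hq]
          have hins : ((PySem.Dict.mk (d.items.map (fA xs))).insert p.1 "BlackTrue")
              = PySem.Dict.mk (d.items.map (fA (p :: xs))) := by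
            apply PySem.Dict.ext
            rw [PySem.Dict.items_insert_of_contains _ _ hcont]
            exact hfun
          rw [if_pos hT, he, hs, hins]
        · have hfun : d.items.map (fA (p :: xs)) = d.items.map (fA xs) := by
            apply List.map_congr_left
            intro q _
            by_cases hq : (p.1 == q.1) = true
            · have hqe : q.1 = p.1 := (eq_of_beq hq).symm
              simp only [fA, uA, hq, if_true, if_neg hF, if_neg hSS, if_neg hT]
              rw [hqe, uA_eq_none_of_not_mem xs p.1 hp1]
            · simp [fA, uA, hq]
          rw [if_neg hT, he, hs, hfun]

theorem insert_loop_char (c v : String) (ys : List (String × String))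
    (d : PySem.Dict String String)
    (hnd : (ys.map Prod.fst).Nodup) (hsub : ∀ p ∈ ys, p.1 ∈ d.keys) :
    ys.foldl (fun d p => if p.2 == c then d.insert p.1 v else d) d
    = PySem.Dict.mk (d.items.map (f2 c v ys)) := by
  induction ys generalizing d with
  | nil =>
    have h1 : d.items.map (f2 c v []) = d.items := by
      rw [List.map_congr_left (fun q (_ : q ∈ d.items) => (rfl : f2 c v [] q = id q))]
      exact List.map_id _
    rw [List.foldl_nil, h1]
  | cons p ys ih =>
    have hp1 : p.1 ∉ ys.map Prod.fst := by
      simp only [List.map_cons, List.nodup_cons] at hnd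
      exact hnd.1
    have hnd' : (ys.map Prod.fst).Nodup := by
      simp only [List.map_cons, List.nodup_cons] at hnd
      exact hnd.2
    have hcont : d.contains p.1 = true := by
      rw [PySem.Dict.contains_iff_mem_keys]
      exact hsub p (List.mem_cons_self)
    have hbne : ∀ q : String × String, ¬ (p.1 == q.1) = true → (q.1 == p.1) = false := by
      intro q hq
      rcases hb : (q.1 == p.1) with _ | _
      · rfl
      · exact absurd (by simp [eq_of_beq hb] : (p.1 == q.1) = true) hq
    rw [List.foldl_cons]
    by_cases hc : (p.2 == c) = true
    · rw [if_pos hc]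
      have hkeys : (d.insert p.1 v).keys = d.keys := PySem.Dict.keys_insert_of_contains _ _ hcont
      have hsub' : ∀ r ∈ ys, r.1 ∈ (d.insert p.1 v).keys := by
        intro r hr; rw [hkeys]; exact hsub r (List.mem_cons_of_mem _ hr)
      rw [ih _ hnd' hsub']
      apply PySem.Dict.ext
      show ((d.insert p.1 v).items.map (f2 c v ys)) = d.items.map (f2 c v (p :: ys))
      rw [PySem.Dict.items_insert_of_contains _ _ hcont, List.map_map]
      apply List.map_congr_left
      intro q _
      show f2 c v ys (if (q.1 == p.1) = true then (p.1, v) else q) = f2 c v (p :: ys) q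
      by_cases hq : (p.1 == q.1) = true
      · have hqe : q.1 = p.1 := (eq_of_beq hq).symm
        have hq2 : (q.1 == p.1) = true := by simp [hqe]
        rw [if_pos hq2]
        have hnone : u2 c v ys p.1 = none := u2_eq_none_of_not_mem c v ys p.1 hp1
        simp [f2, u2, hq, hc, hnone, hqe]
      · rw [hbne q hq, if_neg (by simp)]
        simp [f2, u2, hq]
    · rw [if_neg hc]
      rw [ih _ hnd' (fun r hr => hsub r (List.mem_cons_of_mem _ hr))]
      apply PySem.Dict.ext
      show d.items.map (f2 c v ys) = d.items.map (f2 c v (p :: ys))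
      apply List.map_congr_left
      intro q _
      by_cases hq : (p.1 == q.1) = true
      · have hqe : q.1 = p.1 := (eq_of_beq hq).symm
        have hnone : u2 c v ys p.1 = none := u2_eq_none_of_not_mem c v ys p.1 hp1
        have hc' : (p.2 == c) = false := by
          rcases hb : (p.2 == c) with _ | _
          · rfl
          · exact absurd hb hc
        simp [f2, u2, hq, hc', hnone, hqe]
      · simp [f2, u2, hq]

theorem take_append_big (l₁ l₂ : List (String × String)) (q : String × String) (k : Nat) :
    (l₁ ++ q :: l₂).take (l₁.length + (k + 1)) = l₁ ++ q :: l₂.take k := by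
  rw [List.take_append, List.take_of_length_le (by omega),
    show l₁.length + (k + 1) - l₁.length = k + 1 by omega, List.take_succ_cons]

theorem take_append_small (l₁ l₂ : List (String × String)) (q : String × String) (n : Nat)
    (h : n ≤ l₁.length) :
    (l₁ ++ q :: l₂).take n = l₁.take n := by
  rw [List.take_append, show n - l₁.length = 0 by omega, List.take_zero, List.append_nil]

theorem not_mem_fst_take (l₁ : List (String × String)) (k : String) (n : Nat)
    (h : k ∉ l₁.map Prod.fst) : k ∉ (l₁.take n).map Prod.fst := by
  intro hm
  rw [List.map_take] at hm
  exact h (List.mem_of_mem_take hm)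

theorem lastIdx_isSome_of_any {α : Type} (pred : α → Bool) (l : List α)
    (h : l.any pred = true) : ∃ m, lastIdx pred l = some m := by
  cases hl : lastIdx pred l with
  | none => rw [lastIdx_eq_none_iff] at hl; rw [hl] at h; cases h
  | some m => exact ⟨m, rfl⟩

theorem pointwise (l₁ l₂ : List (String × String)) (q : String × String) (fN : Nat)
    (hq1 : q.1 ∉ l₁.map Prod.fst)
    (hf : lastIdx (fun p => p.2 == "False") (l₁ ++ q :: l₂) = some fN) :
    fA (l₁ ++ q :: l₂) q =
      (match lastIdx (fun p => p.2 == "SS") ((l₁ ++ q :: l₂).take fN) with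
       | none => f2 "SS" "BlackSS" ((l₁ ++ q :: l₂).take fN) q
       | some sN => f2 "True" "BlackTrue" ((l₁ ++ q :: l₂).take sN)
            (f2 "SS" "BlackSS" ((l₁ ++ q :: l₂).take fN) q)) := by
  have hfApp := (lastIdx_append (fun p => p.2 == "False") l₁ (q :: l₂)).symm.trans hf
  have hA : fA (l₁ ++ q :: l₂) q =
      (match (if q.2 == "False" then none
        else if q.2 == "SS" && efb l₂ then some "BlackSS"
        else if q.2 == "True" && efb l₂ && ssb l₂ then some "BlackTrue"
        else none : Option String) with
       | some v => (q.1, v)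
       | none => q) := by
    unfold fA
    rw [uA_split l₁ l₂ q hq1]
  cases hl2 : lastIdx (fun p => p.2 == "False") l₂ with
  | some j₂ =>
    simp only [lastIdx, hl2] at hfApp
    have hfN : fN = l₁.length + (j₂ + 1) := by
      simp only [Option.some.injEq] at hfApp; omega
    have hj₂ : j₂ < l₂.length := lastIdx_lt_length _ _ _ hl2
    have hefb : efb l₂ = true := by
      rcases hany : efb l₂ with _ | _
      · rw [(lastIdx_eq_none_iff _ _).mpr hany] at hl2; cases hl2
      · rfl
    have htake : (l₁ ++ q :: l₂).take fN = l₁ ++ q :: l₂.take j₂ := by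
      rw [hfN]; exact take_append_big l₁ l₂ q j₂
    have hssb : ssb l₂ = (l₂.take j₂).any (fun p => p.2 == "SS") := ssb_eq_any_take l₂ j₂ hl2
    have hu2SS : f2 "SS" "BlackSS" ((l₁ ++ q :: l₂).take fN) q
        = (if q.2 == "SS" then (q.1, "BlackSS") else q) := by
      unfold f2
      rw [htake, u2_split _ _ l₁ _ q hq1]
      by_cases h : (q.2 == "SS") = true <;> simp [h]
    rcases hss : (l₂.take j₂).any (fun p => p.2 == "SS") with _ | _
    · -- no SS strictly between q and the last False
      have hssF : ssb l₂ = false := by rw [hssb, hss]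
      have hlt : lastIdx (fun p => p.2 == "SS") (l₂.take j₂) = none :=
        (lastIdx_eq_none_iff _ _).mpr hss
      by_cases hqss : (q.2 == "SS") = true
      · -- q itself is the last SS before the last False: sN = l₁.length
        have hsN : lastIdx (fun p => p.2 == "SS") ((l₁ ++ q :: l₂).take fN)
            = some l₁.length := by
          rw [htake, lastIdx_append]
          simp only [lastIdx, hlt, hqss, if_pos]
          simp
        have htakeS : (l₁ ++ q :: l₂).take l₁.length = l₁ := List.take_append_length
        have hnone : u2 "True" "BlackTrue" l₁ q.1 = none :=
          u2_eq_none_of_not_mem _ _ _ _ hq1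
        rw [hA]
        simp only [hsN, hu2SS, if_pos hqss, htakeS]
        simp [f2, hnone, eq_of_beq hqss, hefb]
      · have hq2' : (q.2 == "SS") = false := by
          rcases hb : (q.2 == "SS") with _ | _
          · rfl
          · exact absurd hb hqss
        have hals : lastIdx (fun p => p.2 == "SS") ((l₁ ++ q :: l₂).take fN)
            = lastIdx (fun p => p.2 == "SS") l₁ := by
          rw [htake, lastIdx_append]
          simp only [lastIdx, hlt, hq2']
          simp
        rw [hA]
        cases hsl : lastIdx (fun p => p.2 == "SS") l₁ with
        | none =>
          simp only [hals, hsl, hu2SS, if_neg hqss]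
          by_cases hqf : (q.2 == "False") = true <;>
            simp [hqf, hq2', hefb, hssF]
        | some m =>
          have hm : m < l₁.length := lastIdx_lt_length _ _ _ hsl
          have htakeS : (l₁ ++ q :: l₂).take m = l₁.take m :=
            take_append_small l₁ l₂ q m (by omega)
          have hnm : u2 "True" "BlackTrue" (l₁.take m) q.1 = none :=
            u2_eq_none_of_not_mem _ _ _ _ (not_mem_fst_take l₁ q.1 m hq1)
          simp only [hals, hsl, hu2SS, if_neg hqss, htakeS]
          by_cases hqf : (q.2 == "False") = true <;>
            simp [f2, hqf, hq2', hefb, hssF, hnm]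
    · -- there is an SS strictly after q and before the last False
      have hssT : ssb l₂ = true := by rw [hssb, hss]
      obtain ⟨m, hm⟩ := lastIdx_isSome_of_any _ _ hss
      have hmlt : m < (l₂.take j₂).length := lastIdx_lt_length _ _ _ hm
      have hsN : lastIdx (fun p => p.2 == "SS") ((l₁ ++ q :: l₂).take fN)
          = some (l₁.length + (m + 1)) := by
        rw [htake, lastIdx_append]
        simp only [lastIdx, hm]
      have htakeS : (l₁ ++ q :: l₂).take (l₁.length + (m + 1)) = l₁ ++ q :: l₂.take m :=
        take_append_big l₁ l₂ q m
      have hu2T : u2 "True" "BlackTrue" (l₁ ++ q :: l₂.take m) q.1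
          = (if q.2 == "True" then some "BlackTrue" else none) :=
        u2_split _ _ l₁ _ q hq1
      rw [hA]
      simp only [hsN, hu2SS, htakeS]
      by_cases hqss : (q.2 == "SS") = true
      · simp only [if_pos hqss]
        simp [f2, hu2T, eq_of_beq hqss, hefb]
      · have hq2' : (q.2 == "SS") = false := by
          rcases hb : (q.2 == "SS") with _ | _
          · rfl
          · exact absurd hb hqss
        simp only [if_neg hqss]
        by_cases hqt : (q.2 == "True") = true
        · simp [f2, hu2T, hqt, hq2', hefb, hssT, eq_of_beq hqt]
        · have hqt' : (q.2 == "True") = false := by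
            rcases hb : (q.2 == "True") with _ | _
            · rfl
            · exact absurd hb hqt
          by_cases hqf : (q.2 == "False") = true <;>
            simp [f2, hu2T, hqf, hqt', hq2']
  | none =>
    simp only [lastIdx, hl2] at hfApp
    have hefb : efb l₂ = false := (lastIdx_eq_none_iff _ _).mp hl2
    have hssF : ssb l₂ = false := ssb_eq_false_of_efb_false l₂ hefb
    rw [hA]
    by_cases hqf : (q.2 == "False") = true
    · simp only [hqf, if_pos] at hfApp
      have hfN : fN = l₁.length := by
        simp only [Option.some.injEq] at hfApp; omega
      have htakeF : (l₁ ++ q :: l₂).take fN = l₁ := by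
        rw [hfN]; exact List.take_append_length
      cases hsl : lastIdx (fun p => p.2 == "SS") l₁ with
      | none =>
        simp only [htakeF, hsl]
        simp [f2, u2_eq_none_of_not_mem _ _ _ _ hq1, hqf]
      | some m =>
        have hm : m < l₁.length := lastIdx_lt_length _ _ _ hsl
        have htakeS : (l₁ ++ q :: l₂).take m = l₁.take m :=
          take_append_small l₁ l₂ q m (by omega)
        have hnm : u2 "True" "BlackTrue" (l₁.take m) q.1 = none :=
          u2_eq_none_of_not_mem _ _ _ _ (not_mem_fst_take l₁ q.1 m hq1)
        simp only [htakeF, hsl, htakeS]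
        simp [f2, u2_eq_none_of_not_mem _ _ _ _ hq1, hnm, hqf]
    · have hqf' : (q.2 == "False") = false := by
        rcases hb : (q.2 == "False") with _ | _
        · rfl
        · exact absurd hb hqf
      simp only [hqf', Bool.false_eq_true, if_false] at hfApp
      have hfN : fN < l₁.length := lastIdx_lt_length _ _ _ hfApp
      have htakeF : (l₁ ++ q :: l₂).take fN = l₁.take fN :=
        take_append_small l₁ l₂ q fN (by omega)
      have hnf : u2 "SS" "BlackSS" (l₁.take fN) q.1 = none :=
        u2_eq_none_of_not_mem _ _ _ _ (not_mem_fst_take l₁ q.1 fN hq1)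
      cases hsl : lastIdx (fun p => p.2 == "SS") (l₁.take fN) with
      | none =>
        simp only [htakeF, hsl]
        simp [f2, hnf, hqf', hefb, hssF]
      | some m =>
        have hm : m < (l₁.take fN).length := lastIdx_lt_length _ _ _ hsl
        have htakeS : (l₁ ++ q :: l₂).take m = l₁.take m := by
          apply take_append_small
          have := l₁.length_take (i := fN)
          omega
        have hnm : u2 "True" "BlackTrue" (l₁.take m) q.1 = none :=
          u2_eq_none_of_not_mem _ _ _ _ (not_mem_fst_take l₁ q.1 m hq1)
        simp only [htakeF, hsl, htakeS]
        simp [f2, hnf, hnm, hqf', hefb, hssF]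

theorem nodup_split_head (l₁ l₂ : List (String × String)) (q : String × String)
    (h : ((l₁ ++ q :: l₂).map Prod.fst).Nodup) : q.1 ∉ l₁.map Prod.fst := by
  rw [List.map_append, List.map_cons] at h
  rcases List.nodup_append.mp h with ⟨_, _, hdisj⟩
  intro hm
  exact hdisj q.1 hm q.1 (List.mem_cons_self) rfl

theorem nodup_fst_take (xs : List (String × String)) (n : Nat)
    (h : (xs.map Prod.fst).Nodup) : ((xs.take n).map Prod.fst).Nodup := by
  rw [List.map_take]
  exact List.Nodup.sublist (List.take_sublist _ _) h

theorem keys_map_f2 (c v : String) (ys xs : List (String × String)) :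
    (xs.map (f2 c v ys)).map Prod.fst = xs.map Prod.fst := by
  rw [List.map_map]
  exact List.map_congr_left (fun q _ => fst_f2 c v ys q)

theorem foldl_ss_pair (l : List (Int × String × String)) (d0 : PySem.Dict String String) (a0 : Int) :
    l.foldl (fun (st : PySem.Dict String String × Int) p =>
        if p.2.2 == "SS" then (st.1.insert p.2.1 "BlackSS", p.1) else st) (d0, a0)
    = (l.foldl (fun d p => if p.2.2 == "SS" then d.insert p.2.1 "BlackSS" else d) d0,
       l.foldl (fun s p => if p.2.2 == "SS" then p.1 else s) a0) := by
  induction l generalizing d0 a0 with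
  | nil => rfl
  | cons x l ih =>
    simp only [List.foldl_cons]
    by_cases hc : (x.2.2 == "SS") = true
    · rw [if_pos hc, if_pos hc, if_pos hc]; exact ih _ _
    · rw [if_neg hc, if_neg hc, if_neg hc]; exact ih _ _

theorem main_eq (xs : List (String × String)) (hpre : (xs.map Prod.fst).Nodup) :
    process_ss_after_false xs = process_ss_after_false_alt xs := by
  have hsub : ∀ p ∈ xs, p.1 ∈ (PySem.Dict.mk xs).keys := by
    intro p hp
    show p.1 ∈ xs.map Prod.fst
    exact List.mem_map_of_mem hp
  have hA : process_ss_after_false xs = xs.map (fA xs) := by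
    unfold process_ss_after_false
    simp only [List.foldl_reverse]
    rw [A_char xs (PySem.Dict.mk xs) hpre hsub]
  rw [hA]
  unfold process_ss_after_false_alt
  simp only []
  rw [foldl_enumerate_lastIdx (fun x : String × String => x.2 == "False") xs 0 (-1)]
  cases hf : lastIdx (fun p : String × String => p.2 == "False") xs with
  | none =>
    simp only [hf]
    rw [if_pos (by simp)]
    have hall : (xs.any fun p => p.2 == "False") = false := (lastIdx_eq_none_iff _ _).mp hf
    show xs.map (fA xs) = xs
    rw [List.map_congr_left (g := id) ?_, List.map_id]
    intro q hq
    obtain ⟨l₁, l₂, rfl⟩ := List.append_of_mem hq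
    have hq1 : q.1 ∉ l₁.map Prod.fst := nodup_split_head l₁ l₂ q hpre
    have hefb : efb l₂ = false := by
      simp only [List.any_append, List.any_cons, Bool.or_eq_false_iff] at hall
      exact hall.2.2
    show fA (l₁ ++ q :: l₂) q = q
    unfold fA
    rw [uA_split l₁ l₂ q hq1]
    by_cases hqf : (q.2 == "False") = true <;> simp [hqf, hefb]
  | some fN =>
    simp only [hf]
    rw [if_neg (by simp)]
    rw [show ((0 : Int) + (fN : Int)) = (fN : Int) by omega, PySem.List.slice_to_natCast]
    have hndT : ((xs.take fN).map Prod.fst).Nodup := nodup_fst_take xs fN hpre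
    have hsubT : ∀ p ∈ xs.take fN, p.1 ∈ (PySem.Dict.mk xs).keys :=
      fun p hp => hsub p (List.mem_of_mem_take hp)
    rw [foldl_ss_pair]
    rw [foldl_enumerate_snd
      (fun (d : PySem.Dict String String) (r : String × String) =>
        if r.2 == "SS" then d.insert r.1 "BlackSS" else d) (xs.take fN) 0 (PySem.Dict.mk xs)]
    rw [insert_loop_char "SS" "BlackSS" (xs.take fN) (PySem.Dict.mk xs) hndT hsubT]
    rw [foldl_enumerate_lastIdx (fun x : String × String => x.2 == "SS") (xs.take fN) 0 (-1)]
    cases hs : lastIdx (fun p : String × String => p.2 == "SS") (xs.take fN) with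
    | none =>
      simp only [hs]
      rw [if_pos (by simp)]
      show xs.map (fA xs) = xs.map (f2 "SS" "BlackSS" (xs.take fN))
      apply List.map_congr_left
      intro q hq
      obtain ⟨l₁, l₂, rfl⟩ := List.append_of_mem hq
      have hq1 : q.1 ∉ l₁.map Prod.fst := nodup_split_head l₁ l₂ q hpre
      have := pointwise l₁ l₂ q fN hq1 hf
      rw [hs] at this
      exact this
    | some sN =>
      simp only [hs]
      rw [if_neg (by simp)]
      rw [show ((0 : Int) + (sN : Int)) = (sN : Int) by omega, PySem.List.slice_to_natCast]
      have hndS : ((xs.take sN).map Prod.fst).Nodup := nodup_fst_take xs sN hpre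
      have hsubS : ∀ p ∈ xs.take sN,
          p.1 ∈ (PySem.Dict.mk (xs.map (f2 "SS" "BlackSS" (xs.take fN)))).keys := by
        intro p hp
        show p.1 ∈ (xs.map (f2 "SS" "BlackSS" (xs.take fN))).map Prod.fst
        rw [keys_map_f2]
        exact List.mem_map_of_mem (List.mem_of_mem_take hp)
      rw [insert_loop_char "True" "BlackTrue" (xs.take sN)
        (PySem.Dict.mk (xs.map (f2 "SS" "BlackSS" (xs.take fN)))) hndS hsubS]
      show xs.map (fA xs)
          = (xs.map (f2 "SS" "BlackSS" (xs.take fN))).map (f2 "True" "BlackTrue" (xs.take sN))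
      rw [List.map_map]
      apply List.map_congr_left
      intro q hq
      obtain ⟨l₁, l₂, rfl⟩ := List.append_of_mem hq
      have hq1 : q.1 ∉ l₁.map Prod.fst := nodup_split_head l₁ l₂ q hpre
      have := pointwise l₁ l₂ q fN hq1 hf
      rw [hs] at this
      exact this

-- ===== VERDICT (by name: the statement is the Claim_ definition above) =====
theorem process_ss_after_false_spec : Claim_equal_process_ss_after_false := by
  intro date_dict _ hpre
  unfold Spec_process_ss_after_false
  exact main_eq date_dict hpre
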